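-- pv_equiv track=rewrite | github.com/pypi-data/pypi-mirror-369 | packages/django-plugin-debug-toolbar/django_plugin_debug_toolbar-0.1.1.tar.gz/django_plugin_debug_toolbar-0.1.1/src/django_plugin_debug_toolbar/__init__.py | _inject_middleware
-- ===== SOURCE A (Python) =====
-- def _inject_middleware(current_middleware: list[str]) -> list[str]:
--     """Inject DebugToolbarMiddleware early, but not too early."""
--     TOOLBAR_MUST_GO_AFTER = [
--         "django.middleware.gzip.GZipMiddleware",
--         "xff.middleware.XForwardedForMiddleware",
--         "x_forwarded_for.middleware.XForwardedForMiddleware",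
--     ]
--     position = max(
--         _next_index_or_start(current_middleware, mw) for mw in TOOLBAR_MUST_GO_AFTER
--     )
--
--     return [
--         *current_middleware[:position],
--         "debug_toolbar.middleware.DebugToolbarMiddleware",
--         *current_middleware[position:],
--     ]
--
-- def _next_index_or_start(lst: list, item):
--     try:
--         return lst.index(item) + 1
--     except ValueError:
--         return 0
-- ===== SOURCE B (Python) =====
-- _TARGETS = {
--     "django.middleware.gzip.GZipMiddleware",
--     "xff.middleware.XForwardedForMiddleware",
--     "x_forwarded_for.middleware.XForwardedForMiddleware",
-- }
--
--
-- def _inject_middleware(current_middleware: list[str]) -> list[str]: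
--     """Inject DebugToolbarMiddleware early, but not too early."""
--     position = 0
--     seen = set()
--     for i, mw in enumerate(current_middleware):
--         if mw in _TARGETS and mw not in seen:
--             seen.add(mw)
--             position = i + 1
--     return [
--         *current_middleware[:position],
--         "debug_toolbar.middleware.DebugToolbarMiddleware",
--         *current_middleware[position:],
--     ]
-- ===== Notes on version B (the rewrite author's own statement) =====
-- stated objective: alternative
-- what changed: Replaces A's three separate list.index scans (one per target name) with a single enumerate pass that keeps a running insertion position using a set of already-seen target names.
import Mathlib
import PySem

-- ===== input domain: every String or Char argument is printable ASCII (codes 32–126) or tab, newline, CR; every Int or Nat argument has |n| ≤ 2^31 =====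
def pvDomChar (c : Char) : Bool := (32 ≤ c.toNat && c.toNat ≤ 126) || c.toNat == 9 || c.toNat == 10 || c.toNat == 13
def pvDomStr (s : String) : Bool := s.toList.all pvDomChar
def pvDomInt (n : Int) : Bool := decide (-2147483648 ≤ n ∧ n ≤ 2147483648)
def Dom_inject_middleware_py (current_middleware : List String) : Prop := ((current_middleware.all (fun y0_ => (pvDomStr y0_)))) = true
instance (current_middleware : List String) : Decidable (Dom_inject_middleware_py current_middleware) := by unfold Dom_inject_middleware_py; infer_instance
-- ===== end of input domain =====

-- B replaces A's three per-name list.index scans by one enumerate pass with a seen-set (objective: alternative single-pass algorithm, same cost).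

-- ===== PORT A =====
def nextIndexOrStart (lst : List String) (item : String) : Int :=
  match PySem.List.index? lst item with
  | some i => (i : Int) + 1
  | none => 0

def inject_middleware_py (current_middleware : List String) : List String :=
  let TOOLBAR_MUST_GO_AFTER : List String :=
    ["django.middleware.gzip.GZipMiddleware",
     "xff.middleware.XForwardedForMiddleware",
     "x_forwarded_for.middleware.XForwardedForMiddleware"]
  let position : Int :=
    match PySem.List.max? (TOOLBAR_MUST_GO_AFTER.map (fun mw => nextIndexOrStart current_middleware mw)) (fun x => x) with
    | some p => p
    | none => 0   -- unreachable: the literal list is nonempty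
  PySem.List.slice current_middleware none (some position)
    ++ ["debug_toolbar.middleware.DebugToolbarMiddleware"]
    ++ PySem.List.slice current_middleware (some position) none

-- ===== PORT B =====
def bTargets : PySem.Set String :=
  PySem.Set.ofList
    ["django.middleware.gzip.GZipMiddleware",
     "xff.middleware.XForwardedForMiddleware",
     "x_forwarded_for.middleware.XForwardedForMiddleware"]

def bStep (ts : List String) (st : Int × PySem.Set String) (p : Int × String) : Int × PySem.Set String :=
  if p.2 ∈ ts ∧ p.2 ∉ st.2 then (p.1 + 1, PySem.Set.add st.2 p.2) else st

def inject_middleware_py_alt (current_middleware : List String) : List String :=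
  let st := (PySem.List.enumerate current_middleware 0).foldl (bStep bTargets) (0, PySem.Set.empty)
  let position : Int := st.1
  PySem.List.slice current_middleware none (some position)
    ++ ["debug_toolbar.middleware.DebugToolbarMiddleware"]
    ++ PySem.List.slice current_middleware (some position) none

-- ===== PRECONDITION & SPEC =====
def Spec_inject_middleware_py (current_middleware : List String) (out : List String) : Prop := out = inject_middleware_py_alt current_middleware
instance (current_middleware : List String) (out : List String) : Decidable (Spec_inject_middleware_py current_middleware out) := by unfold Spec_inject_middleware_py; infer_instance

-- ===== CLAIM (what is proved, stated in full; the proofs are below) =====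
def Claim_equal_inject_middleware_py : Prop := ∀ (current_middleware : List String), Dom_inject_middleware_py current_middleware → Spec_inject_middleware_py current_middleware (inject_middleware_py current_middleware)

-- ===== LEMMAS AND PROOFS =====

-- index of t in cm, offset by k, +1; 0 if absent
def nioK (cm : List String) (k : Int) (t : String) : Int :=
  match PySem.List.index? cm t with
  | some i => k + (i : Int) + 1
  | none => 0

-- max of the nioK values of the not-yet-seen targets
def Sfun (ts : List String) (cm : List String) (k : Int) (seen : List String) : Int :=
  match ts with
  | [] => 0
  | t :: ts' => max (if t ∈ seen then 0 else nioK cm k t) (Sfun ts' cm k seen)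

lemma nioK_nil (k : Int) (t : String) : nioK [] k t = 0 := by
  simp [nioK, PySem.List.index?]

lemma nioK_cons_self (x : String) (rest : List String) (k : Int) :
    nioK (x :: rest) k x = k + 1 := by
  simp only [nioK, PySem.List.index?_cons_self]
  omega

lemma nioK_cons_ne (x t : String) (rest : List String) (k : Int) (h : x ≠ t) :
    nioK (x :: rest) k t = nioK rest (k + 1) t := by
  simp only [nioK, PySem.List.index?_cons_of_ne _ h]
  cases PySem.List.index? rest t
  · simp
  · simp; omega

lemma nioK_nonneg (cm : List String) (k : Int) (t : String) (hk : 0 ≤ k) :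
    0 ≤ nioK cm k t := by
  simp only [nioK]
  cases PySem.List.index? cm t
  · simp
  · simp; omega

lemma Sfun_nil_cm (ts : List String) (k : Int) (seen : List String) :
    Sfun ts [] k seen = 0 := by
  induction ts with
  | nil => rfl
  | cons t ts' ih => simp [Sfun, ih, nioK_nil]

lemma Sfun_shift (ts : List String) (x : String) (rest : List String) (k : Int)
    (seen : List String) (h : x ∉ ts ∨ x ∈ seen) :
    Sfun ts (x :: rest) k seen = Sfun ts rest (k + 1) seen := by
  induction ts with
  | nil => rfl
  | cons t ts' ih =>
    have hne : t ∈ seen ∨ x ≠ t := by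
      rcases h with h | h
      · right; intro he; exact h (he ▸ List.mem_cons_self)
      · by_cases ht : t ∈ seen
        · exact Or.inl ht
        · right; intro he; exact ht (he ▸ h)
    have hrest : x ∉ ts' ∨ x ∈ seen := by
      rcases h with h | h
      · exact Or.inl (fun hx => h (List.mem_cons_of_mem _ hx))
      · exact Or.inr h
    rw [Sfun, Sfun, ih hrest]
    by_cases hts : t ∈ seen
    · simp [hts]
    · rcases hne with hne | hne
      · exact absurd hne hts
      · simp [hts, nioK_cons_ne _ _ _ _ hne]

lemma Sfun_cons_new (ts : List String) (x : String) (rest : List String) (k : Int)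
    (seen : List String) (hx : x ∉ seen) (hk : 0 ≤ k) :
    Sfun ts (x :: rest) k seen
      = max (if x ∈ ts then k + 1 else 0) (Sfun ts rest (k + 1) (PySem.Set.add seen x)) := by
  induction ts with
  | nil => simp [Sfun]
  | cons t ts' ih =>
    rw [Sfun, Sfun, ih]
    by_cases htx : t = x
    · subst htx
      have h1 : nioK (t :: rest) k t = k + 1 := nioK_cons_self t rest k
      have h2 : t ∈ PySem.Set.add seen t := by
        rw [PySem.Set.mem_add]; exact Or.inr rfl
      simp only [hx, h1, h2, List.mem_cons, true_or]
      by_cases hts : t ∈ ts' <;> simp [hts] <;> omega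
    · have htx' : x ≠ t := fun he => htx he.symm
      have hmem : t ∈ PySem.Set.add seen x ↔ t ∈ seen := by
        rw [PySem.Set.mem_add]
        constructor
        · rintro (h | h)
          · exact h
          · exact absurd h.symm htx'
        · exact Or.inl
      have hx2 : (x ∈ t :: ts') ↔ (x ∈ ts') := by
        simp [List.mem_cons, fun h : x = t => htx' h]
      rw [nioK_cons_ne _ _ _ _ htx']
      by_cases hts : t ∈ seen <;> by_cases hxts : x ∈ ts' <;>
        simp [hts, hmem, hx2, hxts] <;> omega

lemma foldl_char (ts cm : List String) : ∀ (k pos : Int) (seen : List String),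
    0 ≤ pos → pos ≤ k →
    ((PySem.List.enumerate cm k).foldl (bStep ts) (pos, seen)).1
      = max pos (Sfun ts cm k seen) := by
  induction cm with
  | nil =>
    intro k pos seen h0 hk
    rw [Sfun_nil_cm]
    simp [PySem.List.enumerate_nil]
    omega
  | cons x rest ih =>
    intro k pos seen h0 hk
    rw [PySem.List.enumerate_cons, List.foldl_cons]
    by_cases hcond : x ∈ ts ∧ x ∉ seen
    · rw [show bStep ts (pos, seen) (k, x) = (k + 1, PySem.Set.add seen x) from by
        simp [bStep, hcond]]
      rw [ih (k + 1) (k + 1) _ (by omega) le_rfl]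
      rw [Sfun_cons_new ts x rest k seen hcond.2 (by omega), if_pos hcond.1]
      omega
    · rw [show bStep ts (pos, seen) (k, x) = (pos, seen) from by
        simp only [bStep, if_neg hcond]]
      rw [ih (k + 1) pos seen h0 (by omega)]
      rw [Sfun_shift ts x rest k seen (by tauto)]

lemma nioK_zero (cm : List String) (t : String) :
    nioK cm 0 t = nextIndexOrStart cm t := by
  simp only [nioK, nextIndexOrStart]
  cases PySem.List.index? cm t
  · simp
  · simp

lemma positions_eq (cm : List String) :
    ((PySem.List.enumerate cm 0).foldl (bStep bTargets) (0, PySem.Set.empty)).1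
      = (match PySem.List.max?
            (([ "django.middleware.gzip.GZipMiddleware",
                "xff.middleware.XForwardedForMiddleware",
                "x_forwarded_for.middleware.XForwardedForMiddleware"] : List String).map
              (fun mw => nextIndexOrStart cm mw)) (fun x => x) with
         | some p => p
         | none => 0) := by
  rw [foldl_char bTargets cm 0 0 PySem.Set.empty le_rfl le_rfl]
  rw [List.map, List.map, List.map, List.map, PySem.List.max?_id_cons]
  have hb : bTargets = ["django.middleware.gzip.GZipMiddleware",
      "xff.middleware.XForwardedForMiddleware",
      "x_forwarded_for.middleware.XForwardedForMiddleware"] := by decide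
  have n3 : 0 ≤ nextIndexOrStart cm "x_forwarded_for.middleware.XForwardedForMiddleware" := by
    rw [← nioK_zero]
    exact nioK_nonneg cm 0 _ le_rfl
  rw [hb]
  simp [Sfun, PySem.Set.empty, nioK_zero]
  rw [max_eq_left n3]

-- ===== VERDICT (by name: the statement is the Claim_ definition above) =====
theorem inject_middleware_py_spec : Claim_equal_inject_middleware_py := by
  intro cm _
  show inject_middleware_py cm = inject_middleware_py_alt cm
  simp only [inject_middleware_py, inject_middleware_py_alt]
  rw [positions_eq cm]
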